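-- pv_equiv track=rewrite | github.com/AndreiZherder/leetcode | 2397-maximum-rows-covered-by-columns.py | kbits
-- ===== SOURCE A (Python) =====
-- from itertools import combinations
--
-- def kbits(n: int, k: int):
--     ans = []
--     for bits in combinations(range(n), k):
--         num = 0
--         for bit in bits:
--             num |= 1 << bit
--         ans.append(num)
--     return ans
-- ===== SOURCE B (Python) =====
-- def kbits(n: int, k: int):
--     # DFS on "include bit / skip bit" with an incremental running mask,
--     # pruning branches that cannot still place all remaining bits.
--     def dfs(start, remaining, mask):
--         if remaining == 0:
--             return [mask]
--         if n - start < remaining: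
--             return []
--         return dfs(start + 1, remaining - 1, mask | (1 << start)) + dfs(start + 1, remaining, mask)
--     return dfs(0, k, 0)
-- ===== Notes on version B (the rewrite author's own statement) =====
-- stated objective: alternative
-- what changed: Replaces materializing every k-combination tuple and OR-folding each one (O(C(n,k)*k)) by an include/exclude DFS that carries one incremental running bitmask and prunes dead branches, never building the tuples.
import Mathlib
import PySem

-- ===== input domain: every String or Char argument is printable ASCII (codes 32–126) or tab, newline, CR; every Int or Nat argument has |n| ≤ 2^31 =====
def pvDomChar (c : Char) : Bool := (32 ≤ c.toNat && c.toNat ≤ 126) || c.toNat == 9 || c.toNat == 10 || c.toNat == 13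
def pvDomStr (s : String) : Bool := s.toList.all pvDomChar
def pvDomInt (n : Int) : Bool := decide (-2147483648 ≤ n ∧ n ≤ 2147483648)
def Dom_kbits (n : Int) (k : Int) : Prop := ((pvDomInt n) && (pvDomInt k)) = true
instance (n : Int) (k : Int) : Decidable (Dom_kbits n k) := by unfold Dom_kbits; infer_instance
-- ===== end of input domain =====

-- B replaces materialized combination tuples + per-tuple OR-fold by an include/exclude DFS
-- with an incremental running bitmask (objective: alternative algorithm, same outputs).
-- Pre_kbits excludes k < 0, on which Python A raises ValueError (and B does not return).


-- Python's 1 << bit; exact for the bit values both programs ever shift by (elements of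
-- range(n), hence ≥ 0; Python raises on a negative shift, which never occurs here).
def pyShl (bit : Int) : Int := (1 : Int) <<< bit.toNat

-- ===== PORT A =====
-- itertools.combinations(xs, k): all k-element sublists in lexicographic order of positions
-- (the library call, ported as the corresponding function; order matches CPython's).
def combosA (xs : List Int) (k : Nat) : List (List Int) :=
  match k, xs with
  | 0, _ => [[]]
  | _ + 1, [] => []
  | k + 1, x :: rest => ((combosA rest k).map (fun c => x :: c)) ++ combosA rest (k + 1)

def kbits (n : Int) (k : Int) : List Int :=
  if k < 0 then []  -- Python: combinations raises ValueError for k < 0; excluded by Pre_kbits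
  else (combosA (PySem.List.pyRange 0 n 1) k.toNat).map
    (fun bits => bits.foldl (fun num bit => PySem.Int.bor num (pyShl bit)) 0)

-- ===== PORT B =====
-- dfs(start, remaining, mask) of Source B; avail is fuel = (n - start).toNat, only consumed
-- where the Python recurses, so the equations follow Source B's branches exactly.
def dfsB (n : Int) (avail : Nat) (start remaining mask : Int) : List Int :=
  if remaining = 0 then [mask]
  else if n - start < remaining then []
  else match avail with
    | 0 => []  -- unreachable when avail ≥ (n - start).toNat
    | a + 1 =>
      dfsB n a (start + 1) (remaining - 1) (PySem.Int.bor mask (pyShl start)) ++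
      dfsB n a (start + 1) remaining mask

def kbits_alt (n : Int) (k : Int) : List Int := dfsB n n.toNat 0 k 0

-- ===== PRECONDITION & SPEC =====
-- Pre_kbits excludes exactly k < 0: there Python A raises ValueError (no value returned).
def Pre_kbits (n : Int) (k : Int) : Prop := 0 ≤ k
instance (n : Int) (k : Int) : Decidable (Pre_kbits n k) := by unfold Pre_kbits; infer_instance
def pvWitness_kbits : Int × Int := (4, 2)

def Spec_kbits (n : Int) (k : Int) (out : List Int) : Prop := out = kbits_alt n k
instance (n : Int) (k : Int) (out : List Int) : Decidable (Spec_kbits n k out) := by unfold Spec_kbits; infer_instance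

-- ===== CLAIM (what is proved, stated in full; the proofs are below) =====
def Claim_equal_kbits : Prop := ∀ (n : Int) (k : Int), Dom_kbits n k → Pre_kbits n k → Spec_kbits n k (kbits n k)

-- ===== LEMMAS AND PROOFS =====

-- Proof-side middle form: B's DFS over the explicit list of still-available bits.
def dfsL : List Int → Nat → Int → List Int
  | _, 0, mask => [mask]
  | [], _ + 1, _ => []
  | x :: xs, r + 1, mask => dfsL xs r (PySem.Int.bor mask (pyShl x)) ++ dfsL xs (r + 1) mask

theorem dfsL_nil_of_short (xs : List Int) (r : Nat) (mask : Int)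
    (h : xs.length < r) : dfsL xs r mask = [] := by
  induction xs generalizing r mask with
  | nil => cases r with
    | zero => omega
    | succ r => simp [dfsL]
  | cons x xs ih =>
    cases r with
    | zero => omega
    | succ r =>
      simp only [List.length_cons] at h
      rw [dfsL, ih r _ (by omega), ih (r + 1) mask (by omega), List.nil_append]

theorem combosA_eq_dfsL (xs : List Int) (r : Nat) (mask : Int) :
    (combosA xs r).map (fun bits => bits.foldl (fun num bit => PySem.Int.bor num (pyShl bit)) mask)
      = dfsL xs r mask := by
  induction xs generalizing r mask with
  | nil => cases r <;> simp [combosA, dfsL]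
  | cons x xs ih =>
    cases r with
    | zero => simp [combosA, dfsL]
    | succ r =>
      simp only [combosA, dfsL, List.map_append, List.map_map]
      rw [← ih r (PySem.Int.bor mask (pyShl x)), ← ih (r + 1) mask]
      rfl

theorem dfsB_eq_dfsL (n : Int) (avail : Nat) (s : Int) (r : Nat) (mask : Int)
    (h : (n - s).toNat ≤ avail) :
    dfsB n avail s (r : Int) mask = dfsL (PySem.List.pyRange s n 1) r mask := by
  induction avail generalizing s r mask with
  | zero =>
    cases r with
    | zero => simp [dfsB, dfsL]
    | succ r =>
      have hns : n - s < ((r : Int) + 1) := by omega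
      rw [dfsB]
      simp only [Nat.cast_succ] at hns ⊢
      rw [if_neg (by omega), if_pos hns]
      rw [PySem.List.pyRange_one_eq_nil (by omega)]
      simp [dfsL]
  | succ a ih =>
    cases r with
    | zero => simp [dfsB, dfsL]
    | succ r =>
      rw [dfsB]
      simp only [Nat.cast_succ]
      rw [if_neg (by omega)]
      by_cases hp : n - s < (r : Int) + 1
      · rw [if_pos hp]
        exact (dfsL_nil_of_short _ _ _ (by
          rw [PySem.List.length_pyRange_one]; omega)).symm
      · rw [if_neg hp]
        have hsn : s < n := by omega
        rw [PySem.List.pyRange_one_cons hsn, dfsL]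
        have h1 : (n - (s + 1)).toNat ≤ a := by omega
        have e1 := ih (s + 1) r (PySem.Int.bor mask (pyShl s)) h1
        have e2 := ih (s + 1) (r + 1) mask h1
        push_cast at e1 e2 ⊢
        rw [show (r : Int) + 1 - 1 = (r : Int) by ring, e1, e2]

-- ===== VERDICT (by name: the statement is the Claim_ definition above) =====
theorem kbits_spec : Claim_equal_kbits := by
  intro n k _ hk
  unfold Pre_kbits at hk
  unfold Spec_kbits kbits kbits_alt
  rw [if_neg (by omega)]
  rw [combosA_eq_dfsL]
  have h2 := dfsB_eq_dfsL n n.toNat 0 k.toNat 0 (by omega)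
  rw [Int.toNat_of_nonneg hk] at h2
  exact h2.symm
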